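-- pv_equiv track=rewrite | github.com/RaulSanchezzt/projects | Software/OpenWebinars - Python from 0/more/ejercicio9.py | ComprobarSecuencia
-- ===== SOURCE A (Python) =====
-- def ComprobarSecuencia(secreto,usuario):
-- 	m = 0
-- 	h = 0
-- 	# recorro los dos vectores
-- 	for indice_secreto in range(0,len(secreto)):
-- 		for indice_usuario in range(0,len(usuario)):
-- 			if secreto[indice_secreto] == usuario[indice_usuario]:
-- 				# Si el elemento coincide y además están en la misma posición, incremento los muertos.
-- 				if indice_secreto == indice_usuario:
-- 					m = m + 1
-- 				else:
-- 					# Si el elemento coincide pero no están en la misma posición, incremento los heridos.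
-- 					h = h + 1
-- 	return m,h
-- ===== SOURCE B (Python) =====
-- def ComprobarSecuencia(secreto, usuario):
--     cuenta = {}
--     for v in usuario:
--         cuenta[v] = cuenta.get(v, 0) + 1
--     total = 0
--     for x in secreto:
--         total += cuenta.get(x, 0)
--     m = 0
--     for a, b in zip(secreto, usuario):
--         if a == b:
--             m += 1
--     return m, total - m
-- ===== Notes on version B (the rewrite author's own statement) =====
-- stated objective: faster
-- what changed: Replaced A's O(n*m) nested index loops by a hash counter of usuario (total value matches = sum of counts over secreto) plus one zip pass for same-position matches, with h = total - m.
import Mathlib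
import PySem

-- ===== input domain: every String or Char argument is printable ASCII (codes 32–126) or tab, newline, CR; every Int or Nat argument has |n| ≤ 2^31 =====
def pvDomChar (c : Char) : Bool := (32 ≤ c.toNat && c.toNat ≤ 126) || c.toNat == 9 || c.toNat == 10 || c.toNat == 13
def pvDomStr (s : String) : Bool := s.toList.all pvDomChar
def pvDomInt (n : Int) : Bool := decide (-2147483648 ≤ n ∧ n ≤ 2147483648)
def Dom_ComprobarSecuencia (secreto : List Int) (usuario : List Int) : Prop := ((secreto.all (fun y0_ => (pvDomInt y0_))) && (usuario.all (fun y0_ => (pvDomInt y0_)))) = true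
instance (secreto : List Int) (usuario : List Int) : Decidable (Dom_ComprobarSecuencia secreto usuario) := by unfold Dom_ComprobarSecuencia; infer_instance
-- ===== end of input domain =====

-- B replaces A's nested scans by a counter of `usuario` plus two single passes.

-- ===== PORT A =====
-- literal transliteration of A's two nested index loops
def ComprobarSecuencia (secreto : List Int) (usuario : List Int) : Int × Int :=
  (PySem.List.pyRange 0 (PySem.List.len secreto) 1).foldl
    (fun mh i =>
      (PySem.List.pyRange 0 (PySem.List.len usuario) 1).foldl
        (fun mh j =>
          if PySem.List.pyGetD secreto i 0 = PySem.List.pyGetD usuario j 0 then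
            if i = j then (mh.1 + 1, mh.2) else (mh.1, mh.2 + 1)
          else mh)
        mh)
    ((0 : Int), (0 : Int))

-- ===== PORT B =====
-- literal transliteration of Source B: counter of usuario, one pass for total matches, one zip pass for diagonal matches
def ComprobarSecuencia_alt (secreto : List Int) (usuario : List Int) : Int × Int :=
  let cuenta := usuario.foldl (fun d v => d.insert v (d.getD v 0 + 1)) (PySem.Dict.empty : PySem.Dict Int Int)
  let total := secreto.foldl (fun t x => t + cuenta.getD x 0) (0 : Int)
  let m := (secreto.zip usuario).foldl (fun m p => if p.1 = p.2 then m + 1 else m) (0 : Int)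
  (m, total - m)

-- ===== PRECONDITION & SPEC =====
def Spec_ComprobarSecuencia (secreto : List Int) (usuario : List Int) (out : Int × Int) : Prop := out = ComprobarSecuencia_alt secreto usuario
instance (secreto : List Int) (usuario : List Int) (out : Int × Int) : Decidable (Spec_ComprobarSecuencia secreto usuario out) := by unfold Spec_ComprobarSecuencia; infer_instance

-- ===== CLAIM (what is proved, stated in full; the proofs are below) =====
def Claim_equal_ComprobarSecuencia : Prop := ∀ (secreto : List Int) (usuario : List Int), Dom_ComprobarSecuencia secreto usuario → Spec_ComprobarSecuencia secreto usuario (ComprobarSecuencia secreto usuario)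

-- ===== LEMMAS AND PROOFS =====

-- A's inner loop over the enumerated usuario counts diagonal and off-diagonal value matches
theorem pvInnerFold (l : List (Int × Int)) (v i : Int) (m h : Int) :
    l.foldl (fun mh p => if v = p.2 then (if i = p.1 then (mh.1 + 1, mh.2) else (mh.1, mh.2 + 1)) else mh) (m, h)
      = (m + (l.countP (fun p => v == p.2 && i == p.1) : Int),
         h + (l.countP (fun p => v == p.2 && !(i == p.1)) : Int)) := by
  induction l generalizing m h with
  | nil => simp
  | cons q t ih =>
      obtain ⟨qi, qv⟩ := q
      simp only [List.foldl_cons, List.countP_cons]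
      by_cases hv : v = qv <;> by_cases hi : i = qi
      · subst hv; subst hi
        rw [ih]; simp; ring
      · subst hv
        simp only [if_neg hi]
        rw [ih]; simp [hi]; ring
      · simp only [if_neg hv]
        rw [ih]; simp [hv]
      · simp only [if_neg hv]
        rw [ih]; simp [hv]

-- a fold accumulating two independent sums componentwise
theorem pvPairFold (l : List (Int × Int)) (f g : Int × Int → Int) (m h : Int) :
    l.foldl (fun mh p => (mh.1 + f p, mh.2 + g p)) (m, h)
      = (m + (l.map f).sum, h + (l.map g).sum) := by
  induction l generalizing m h with
  | nil => simp
  | cons q t ih => simp [ih]; constructor <;> ring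

-- diagonal and off-diagonal matches together are all value matches
theorem pvCountSplit (l : List (Int × Int)) (v i : Int) :
    l.countP (fun p => v == p.2 && i == p.1) + l.countP (fun p => v == p.2 && !(i == p.1))
      = l.countP (fun p => v == p.2) := by
  induction l with
  | nil => simp
  | cons q t ih =>
      simp only [List.countP_cons]
      by_cases hv : v = q.2
      · subst hv
        by_cases hi : i = q.1
        · subst hi; simp; omega
        · simp [hi]; omega
      · simp [hv]; omega

-- value matches over the enumeration are plain occurrence counts
theorem pvCountSnd (u : List Int) (j0 v : Int) :
    (PySem.List.enumerate u j0).countP (fun p => v == p.2) = u.count v := by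
  induction u generalizing j0 with
  | nil => simp [PySem.List.enumerate_nil]
  | cons b t ih =>
      rw [PySem.List.enumerate_cons, List.countP_cons, List.count_cons, ih (j0 + 1)]
      by_cases hv : v = b
      · subst hv; simp
      · have hv' : ¬ b = v := fun h => hv h.symm
        simp [hv, hv']

-- no index below the enumeration start ever matches
theorem pvCountBelow (l : List Int) (j1 i : Int) (v : Int) (hi : i < j1) :
    (PySem.List.enumerate l j1).countP (fun p => v == p.2 && i == p.1) = 0 := by
  induction l generalizing j1 with
  | nil => simp [PySem.List.enumerate_nil]
  | cons b t ih =>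
      rw [PySem.List.enumerate_cons, List.countP_cons]
      have h1 : ¬ (i = j1) := by omega
      simp [h1, ih (j1 + 1) (by omega)]

-- the crux: summing diagonal matches over the enumerated secreto is the zip count
theorem pvDiagSum (s : List Int) (u : List Int) (j0 : Int) :
    (((PySem.List.enumerate s j0).map
        (fun q => ((PySem.List.enumerate u j0).countP (fun p => q.2 == p.2 && q.1 == p.1) : Int))).sum)
      = ((s.zip u).countP (fun p => p.1 == p.2) : Int) := by
  induction s generalizing u j0 with
  | nil => simp [PySem.List.enumerate_nil]
  | cons a s' ih =>
      cases u with
      | nil =>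
          simp [PySem.List.enumerate_nil]
      | cons b u' =>
          rw [PySem.List.enumerate_cons a s' j0, PySem.List.enumerate_cons b u' j0]
          rw [List.map_cons, List.sum_cons]
          have hhead : (((j0, b) :: PySem.List.enumerate u' (j0 + 1)).countP
              (fun p => a == p.2 && j0 == p.1) : Int)
              = if a = b then 1 else 0 := by
            rw [List.countP_cons, pvCountBelow u' (j0 + 1) j0 a (by omega)]
            by_cases hab : a = b <;> simp [hab]
          have hrest : (PySem.List.enumerate s' (j0 + 1)).map
              (fun q => ((((j0, b) :: PySem.List.enumerate u' (j0 + 1)).countP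
                  (fun p => q.2 == p.2 && q.1 == p.1)) : Int))
              = (PySem.List.enumerate s' (j0 + 1)).map
              (fun q => (((PySem.List.enumerate u' (j0 + 1)).countP
                  (fun p => q.2 == p.2 && q.1 == p.1)) : Int)) := by
            apply List.map_congr_left
            intro q hq
            obtain ⟨k, hk, rfl⟩ := (PySem.List.mem_enumerate_iff s' (j0 + 1) q).1 hq
            rw [List.countP_cons]
            have : ¬ (j0 + 1 + (k : Int) = j0) := by omega
            simp [this]
          rw [hhead, hrest, ih u' (j0 + 1), List.zip_cons_cons, List.countP_cons]
          by_cases hab : a = b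
          · simp [hab]
            ring
          · simp [hab]

-- A rephrased as a fold over the enumerations
theorem pvA_enum (s u : List Int) : ComprobarSecuencia s u
    = (PySem.List.enumerate s).foldl
        (fun mh q => (PySem.List.enumerate u).foldl
          (fun mh p => if q.2 = p.2 then (if q.1 = p.1 then (mh.1 + 1, mh.2) else (mh.1, mh.2 + 1)) else mh) mh)
        (0, 0) := by
  unfold ComprobarSecuencia
  rw [PySem.List.enumerate_eq_map_pyRange s 0, PySem.List.enumerate_eq_map_pyRange u 0]
  simp only [List.foldl_map]

-- B's zip loop is a countP
theorem pvZipCount (l : List (Int × Int)) (a : Int) :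
    l.foldl (fun m p => if p.1 = p.2 then m + 1 else m) a
      = a + (l.countP (fun p => p.1 == p.2) : Int) := by
  induction l generalizing a with
  | nil => simp
  | cons q t ih =>
      rw [List.foldl_cons]
      by_cases hq : q.1 = q.2
      · simp [hq, ih]
        ring
      · simp [hq, ih]

theorem pvMain (s u : List Int) : ComprobarSecuencia s u = ComprobarSecuencia_alt s u := by
  -- evaluate B
  have hB : ComprobarSecuencia_alt s u
      = (((s.zip u).countP (fun p => p.1 == p.2) : Int),
         (s.map (fun x => (u.count x : Int))).sum
           - ((s.zip u).countP (fun p => p.1 == p.2) : Int)) := by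
    unfold ComprobarSecuencia_alt
    dsimp only
    rw [PySem.List.foldl_add s (fun x =>
        (u.foldl (fun d v => d.insert v (d.getD v 0 + 1)) PySem.Dict.empty).getD x 0) 0]
    rw [pvZipCount]
    have hc : (s.map (fun x =>
        (u.foldl (fun d v => d.insert v (d.getD v 0 + 1)) PySem.Dict.empty).getD x 0)).sum
        = (s.map (fun x => (u.count x : Int))).sum := by
      congr 1
      apply List.map_congr_left
      intro x _
      rw [PySem.Dict.getD_foldl_insert_add_one u PySem.Dict.empty x, PySem.Dict.getD_empty]
      simp
    rw [hc]
    simp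
  -- evaluate A
  have hstep : (fun (mh : Int × Int) (q : Int × Int) => (PySem.List.enumerate u).foldl
        (fun mh p => if q.2 = p.2 then (if q.1 = p.1 then (mh.1 + 1, mh.2) else (mh.1, mh.2 + 1)) else mh) mh)
      = (fun mh q => (mh.1 + ((PySem.List.enumerate u).countP (fun p => q.2 == p.2 && q.1 == p.1) : Int),
                      mh.2 + ((PySem.List.enumerate u).countP (fun p => q.2 == p.2 && !(q.1 == p.1)) : Int))) := by
    funext mh q
    obtain ⟨m, h⟩ := mh
    exact pvInnerFold (PySem.List.enumerate u) q.2 q.1 m h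
  have hA : ComprobarSecuencia s u
      = ((((PySem.List.enumerate s).map
            (fun q => ((PySem.List.enumerate u).countP (fun p => q.2 == p.2 && q.1 == p.1) : Int))).sum),
         (((PySem.List.enumerate s).map
            (fun q => ((PySem.List.enumerate u).countP (fun p => q.2 == p.2 && !(q.1 == p.1)) : Int))).sum)) := by
    rw [pvA_enum, hstep, pvPairFold]
    simp
  rw [hA, hB, pvDiagSum s u 0]
  -- second components agree
  have hsum : (((PySem.List.enumerate s).map
        (fun q => ((PySem.List.enumerate u).countP (fun p => q.2 == p.2 && q.1 == p.1) : Int))).sum)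
      + (((PySem.List.enumerate s).map
        (fun q => ((PySem.List.enumerate u).countP (fun p => q.2 == p.2 && !(q.1 == p.1)) : Int))).sum)
      = (s.map (fun x => (u.count x : Int))).sum := by
    rw [← PySem.List.sum_map_add_int]
    have : (PySem.List.enumerate s).map
        (fun q => ((PySem.List.enumerate u).countP (fun p => q.2 == p.2 && q.1 == p.1) : Int)
            + ((PySem.List.enumerate u).countP (fun p => q.2 == p.2 && !(q.1 == p.1)) : Int))
        = (PySem.List.enumerate s).map (fun q => ((u.count q.2 : Nat) : Int)) := by
      apply List.map_congr_left
      intro q _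
      rw [← Nat.cast_add, pvCountSplit, pvCountSnd]
    have h2 : ((PySem.List.enumerate s).map (fun x => x.2)).map (fun x => ((u.count x : Nat) : Int))
        = s.map (fun x => ((u.count x : Nat) : Int)) := by
      rw [PySem.List.map_snd_enumerate]
    rw [this, ← h2, List.map_map]
    rfl
  have hd := pvDiagSum s u 0
  refine Prod.ext rfl ?_
  simp only
  omega

-- ===== VERDICT (by name: the statement is the Claim_ definition above) =====
theorem ComprobarSecuencia_spec : Claim_equal_ComprobarSecuencia := by
  intro s u _
  unfold Spec_ComprobarSecuencia
  exact pvMain s u
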